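-- pv_equiv track=rewrite | github.com/nicko858/wine | main.py | get_age_word_ending
-- ===== SOURCE A (Python) =====
-- def get_age_word_ending(age):
--     word_ending_rules = {
--         "лет": [11, 12, 13, 14],
--         "год": [1],
--         "года": [2, 3, 4]
--     }
--     for word_ending, digits in word_ending_rules.items():
--         if (age % 100) in digits:
--             return word_ending
--         elif (age % 10) in digits:
--             return word_ending
--     return "лет"
-- ===== SOURCE B (Python) =====
-- # B: no per-call residue checks at all -- a precomputed 100-entry lookup table,
-- # indexed directly by age % 100.
-- _DECADE = ["лет", "год", "года", "года", "года", "лет", "лет", "лет", "лет", "лет"]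
-- _ENDINGS = _DECADE * 10
-- _ENDINGS[11:15] = ["лет"] * 4  # the teens override the last-digit pattern
--
--
-- def get_age_word_ending(age):
--     return _ENDINGS[age % 100]
-- ===== Notes on version B (the rewrite author's own statement) =====
-- stated objective: alternative
-- what changed: Replaces the rule-dict scanned by a loop of residue membership tests with a lookup table precomputed over all residues mod one hundred (the decade pattern tiled, teens slots overridden), so each call is a single table index with no conditionals.
import Mathlib
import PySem

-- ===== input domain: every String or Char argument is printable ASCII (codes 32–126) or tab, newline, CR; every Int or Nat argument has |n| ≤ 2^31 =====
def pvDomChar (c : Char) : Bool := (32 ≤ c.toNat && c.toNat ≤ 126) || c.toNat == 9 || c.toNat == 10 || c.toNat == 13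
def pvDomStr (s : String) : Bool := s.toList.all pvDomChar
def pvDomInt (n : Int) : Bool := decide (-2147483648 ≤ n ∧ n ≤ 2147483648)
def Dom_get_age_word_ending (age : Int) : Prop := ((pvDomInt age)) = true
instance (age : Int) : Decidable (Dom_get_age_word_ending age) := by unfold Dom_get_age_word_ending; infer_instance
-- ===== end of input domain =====

-- B replaces A's rule table + scanning loop with a precomputed lookup table indexed by age % 100 (alternative; same cost).

-- ===== PORT A =====
-- the loop over word_ending_rules.items(); falls through to "лет"
def pvRulesLoop (age : Int) : List (String × List Int) → String
  | [] => "лет"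
  | (w, ds) :: rest =>
      if (PySem.Int.mod age 100) ∈ ds then w
      else if (PySem.Int.mod age 10) ∈ ds then w
      else pvRulesLoop age rest

def get_age_word_ending (age : Int) : String :=
  pvRulesLoop age [("лет", [11, 12, 13, 14]), ("год", [1]), ("года", [2, 3, 4])]

-- ===== PORT B =====
-- _DECADE
def pvDecade : List String := ["лет", "год", "года", "года", "года", "лет", "лет", "лет", "лет", "лет"]
-- _ENDINGS = _DECADE * 10, then _ENDINGS[11:15] = ["лет"] * 4 (slice assignment, ported as take/replicate/drop)
def pvEndings : List String :=
  let e := (List.replicate 10 pvDecade).flatten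
  e.take 11 ++ List.replicate 4 "лет" ++ e.drop 15

def get_age_word_ending_alt (age : Int) : String :=
  -- _ENDINGS[age % 100]: the index is always in [0, 100), so the lookup never fails;
  -- the "лет" default of getD is unreachable
  (PySem.List.pyGet? pvEndings (PySem.Int.mod age 100)).getD "лет"

-- ===== PRECONDITION & SPEC =====
def Spec_get_age_word_ending (age : Int) (out : String) : Prop := out = get_age_word_ending_alt age
instance (age : Int) (out : String) : Decidable (Spec_get_age_word_ending age out) := by unfold Spec_get_age_word_ending; infer_instance

-- ===== CLAIM (what is proved, stated in full; the proofs are below) =====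
def Claim_equal_get_age_word_ending : Prop := ∀ (age : Int), Dom_get_age_word_ending age → Spec_get_age_word_ending age (get_age_word_ending age)

-- ===== LEMMAS AND PROOFS =====

-- both sides depend only on age % 100 (since age % 10 = (age % 100) % 10)
theorem pymod10_eq (age : Int) : PySem.Int.mod age 10 = PySem.Int.mod (PySem.Int.mod age 100) 10 := by
  rw [PySem.Int.mod_eq_emod_of_pos (a := age) (b := 10) (by norm_num),
      PySem.Int.mod_eq_emod_of_pos (b := 10) (by norm_num),
      PySem.Int.mod_eq_emod_of_pos (a := age) (b := 100) (by norm_num)]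
  exact (Int.emod_emod_of_dvd age (by norm_num)).symm

theorem agree_of_mod100 (r : Int) (h0 : 0 ≤ r) (h1 : r < 100)
    (age : Int) (hr : PySem.Int.mod age 100 = r) :
    get_age_word_ending age = get_age_word_ending_alt age := by
  simp only [get_age_word_ending, get_age_word_ending_alt, pvRulesLoop]
  rw [pymod10_eq age, hr]
  interval_cases r <;> decide

-- ===== VERDICT (by name: the statement is the Claim_ definition above) =====
theorem get_age_word_ending_spec : Claim_equal_get_age_word_ending := by
  intro age _
  have h := PySem.Int.mod_eq_emod_of_pos (a := age) (b := 100) (by norm_num)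
  exact agree_of_mod100 (PySem.Int.mod age 100)
    (by rw [h]; exact Int.emod_nonneg _ (by norm_num))
    (by rw [h]; exact Int.emod_lt_of_pos _ (by norm_num)) age rfl
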